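-- pv_equiv track=rewrite | github.com/Julian-Moncarz/ASP_project | sleec_converter/correct_sleec_converter.py | _remove_logical_grouping_parentheses
-- ===== SOURCE A (Python) =====
-- def _remove_logical_grouping_parentheses(condition: str) -> str:
--     """Remove parentheses used for logical grouping while preserving function calls"""
--     # Strategy: remove parentheses that are used for logical grouping
--     # but preserve function call parentheses like happens(...) and holds_at(...)
--
--     # Use a different approach: manually track parentheses and identify logical groupings
--     result = ""
--     i = 0
--     paren_stack = []
--
--     while i < len(condition):
--         char = condition[i]
--
--         if char == '(':
--             # Look ahead to see if this starts a function call or logical grouping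
--             # Check if preceded by a function name
--             if i > 0:
--                 # Find the start of the preceding word
--                 j = i - 1
--                 while j >= 0 and condition[j].isspace():
--                     j -= 1
--                 word_end = j + 1
--                 while j >= 0 and (condition[j].isalnum() or condition[j] == '_'):
--                     j -= 1
--                 word_start = j + 1
--
--                 if word_start < word_end:
--                     preceding_word = condition[word_start:word_end]
--                     # If preceded by function names, keep the parentheses
--                     if preceding_word in ['happens', 'holds_at', 'measure_greater_than', 'measure_less_than']:
--                         result += char
--                         i += 1
--                         continue
--
--             # Find the matching closing parenthesis
--             paren_count = 1
--             j = i + 1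
--             content_start = j
--
--             while j < len(condition) and paren_count > 0:
--                 if condition[j] == '(':
--                     paren_count += 1
--                 elif condition[j] == ')':
--                     paren_count -= 1
--                 j += 1
--
--             if paren_count == 0:
--                 # Found matching parenthesis
--                 content = condition[content_start:j-1]
--
--                 # Check if content contains logical operators or negation
--                 if ' and ' in content or ' or ' in content or content.strip().startswith('not '):
--                     # This is logical grouping - remove parentheses
--                     result += content
--                     i = j
--                     continue
--
--             # If we get here, keep the parenthesis
--             result += char
--
--         else:
--             result += char
--
--         i += 1
--
--     return result
-- ===== SOURCE B (Python) =====
-- def _remove_logical_grouping_parentheses(condition: str) -> str: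
--     """Remove parentheses used for logical grouping while preserving function calls"""
--     FUNCS = ('happens', 'holds_at', 'measure_greater_than', 'measure_less_than')
--     # One stack pass: match[i] = index of the ')' matching the '(' at i.
--     match = {}
--     stack = []
--     for idx, ch in enumerate(condition):
--         if ch == '(':
--             stack.append(idx)
--         elif ch == ')':
--             if stack:
--                 match[stack.pop()] = idx
--     out = []
--     i = 0
--     n = len(condition)
--     while i < n:
--         ch = condition[i]
--         if ch == '(':
--             # word immediately preceding (skipping whitespace)
--             j = i - 1
--             while j >= 0 and condition[j].isspace():
--                 j -= 1
--             e = j + 1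
--             while j >= 0 and (condition[j].isalnum() or condition[j] == '_'):
--                 j -= 1
--             if condition[j + 1:e] in FUNCS:
--                 out.append(ch)
--                 i += 1
--                 continue
--             m = match.get(i)
--             if m is not None:
--                 content = condition[i + 1:m]
--                 if ' and ' in content or ' or ' in content or content.strip().startswith('not '):
--                     out.append(content)
--                     i = m + 1
--                     continue
--             out.append(ch)
--         else:
--             out.append(ch)
--         i += 1
--     return ''.join(out)
-- ===== Notes on version B (the rewrite author's own statement) =====
-- stated objective: faster
-- what changed: B precomputes all matching-parenthesis indices in one stack pass and stores them in a dict, replacing A's per-opening-parenthesis forward re-scan for its matching closer, and collects output pieces joined once at the end instead of repeated string concatenation.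
import Mathlib
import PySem

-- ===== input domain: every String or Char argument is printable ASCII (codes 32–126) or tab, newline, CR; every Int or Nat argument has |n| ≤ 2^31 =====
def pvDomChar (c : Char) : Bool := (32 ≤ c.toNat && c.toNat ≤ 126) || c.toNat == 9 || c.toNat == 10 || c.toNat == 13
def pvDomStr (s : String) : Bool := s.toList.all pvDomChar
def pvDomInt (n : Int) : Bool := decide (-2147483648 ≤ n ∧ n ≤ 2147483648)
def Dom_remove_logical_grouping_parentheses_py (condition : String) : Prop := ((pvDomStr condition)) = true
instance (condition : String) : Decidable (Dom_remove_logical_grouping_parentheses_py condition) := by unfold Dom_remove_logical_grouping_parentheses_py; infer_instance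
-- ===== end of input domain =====

-- B replaces A's per-open-parenthesis forward scan for its matching closer by one stack
-- pass that precomputes all matching-paren indices, then a single scan with dict lookups
-- (objective: faster).

-- ===== PORT A =====
-- shared text of both Pythons: the backward scans that find the word before position i,
-- the function-name list, and the logical-content test
def pvSkipSpace (cs : List Char) : Nat → Nat
  | 0 => 0
  | j + 1 => if PySem.Chars.isspace (cs.getD j ' ') then pvSkipSpace cs j else j + 1

def pvSkipWord (cs : List Char) : Nat → Nat
  | 0 => 0
  | j + 1 =>
    if PySem.Chars.isalnum (cs.getD j ' ') || cs.getD j ' ' == '_' then pvSkipWord cs j else j + 1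

def pvFuncWord (w : List Char) : Bool :=
  w == "happens".toList || w == "holds_at".toList ||
    w == "measure_greater_than".toList || w == "measure_less_than".toList

def pvIsLogical (content : List Char) : Bool :=
  PySem.Chars.isIn " and ".toList content || PySem.Chars.isIn " or ".toList content ||
    PySem.Chars.startswith (PySem.Chars.strip content) "not ".toList

-- A's preceding-word test, with A's `i > 0` and `word_start < word_end` guards
def pvKeepFnA (cs : List Char) (i : Nat) : Bool :=
  if 0 < i then
    let we := pvSkipSpace cs i
    let ws := pvSkipWord cs we
    if ws < we then pvFuncWord ((cs.drop ws).take (we - ws)) else false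
  else false

-- A's inner while loop: scan forward from j counting parens; returns the final (j, paren_count).
-- fuel only makes the loop total; cs.length is enough since j strictly increases.
def pvFindCloseA (cs : List Char) : Nat → Nat → Int → Nat × Int
  | 0, j, count => (j, count)
  | fuel + 1, j, count =>
    if j < cs.length ∧ 0 < count then
      let c := cs.getD j ' '
      let count' := if c = '(' then count + 1 else if c = ')' then count - 1 else count
      pvFindCloseA cs fuel (j + 1) count'
    else (j, count)

-- A's outer while loop over index i, accumulating `result`.
-- fuel only makes the loop total; cs.length is enough since i strictly increases.
def pvLoopA (cs : List Char) : Nat → Nat → List Char → List Char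
  | 0, _, result => result
  | fuel + 1, i, result =>
    if i < cs.length then
      let c := cs.getD i ' '
      if c = '(' then
        if pvKeepFnA cs i then pvLoopA cs fuel (i + 1) (result ++ [c])
        else
          let q := pvFindCloseA cs cs.length (i + 1) 1
          if q.2 = 0 then
            let content := (cs.drop (i + 1)).take (q.1 - 1 - (i + 1))
            if pvIsLogical content then pvLoopA cs fuel q.1 (result ++ content)
            else pvLoopA cs fuel (i + 1) (result ++ [c])
          else pvLoopA cs fuel (i + 1) (result ++ [c])
      else pvLoopA cs fuel (i + 1) (result ++ [c])
    else result

def remove_logical_grouping_parentheses_py (condition : String) : String :=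
  String.ofList (pvLoopA condition.toList condition.toList.length 0 [])

-- ===== PORT B =====
-- one stack pass over the string: match[o] = index of the closer matching the opener at o
def pvBuildMatch : List Char → Nat → List Nat → PySem.Dict Nat Nat → PySem.Dict Nat Nat
  | [], _, _, d => d
  | c :: rest, idx, stack, d =>
    if c = '(' then pvBuildMatch rest (idx + 1) (idx :: stack) d
    else if c = ')' then
      match stack with
      | [] => pvBuildMatch rest (idx + 1) [] d
      | o :: st => pvBuildMatch rest (idx + 1) st (d.insert o idx)
    else pvBuildMatch rest (idx + 1) stack d

-- B's preceding-word test (Source B has no i>0 / empty-word guards: '' is simply not a function name)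
def pvKeepFnB (cs : List Char) (i : Nat) : Bool :=
  let e := pvSkipSpace cs i
  let ws := pvSkipWord cs e
  pvFuncWord ((cs.drop ws).take (e - ws))

-- B's while loop; out is the list of appended pieces, joined at the end.
-- fuel only makes the loop total; cs.length is enough since i strictly increases.
def pvLoopB (cs : List Char) (tbl : PySem.Dict Nat Nat) (fuel i : Nat)
    (out : List (List Char)) : List (List Char) :=
  match fuel with
  | 0 => out
  | fuel + 1 =>
    if i < cs.length then
      let c := cs.getD i ' '
      if c = '(' then
        if pvKeepFnB cs i then pvLoopB cs tbl fuel (i + 1) (out ++ [[c]])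
        else
          match tbl.get? i with
          | some m =>
            let content := (cs.drop (i + 1)).take (m - (i + 1))
            if pvIsLogical content then pvLoopB cs tbl fuel (m + 1) (out ++ [content])
            else pvLoopB cs tbl fuel (i + 1) (out ++ [[c]])
          | none => pvLoopB cs tbl fuel (i + 1) (out ++ [[c]])
      else pvLoopB cs tbl fuel (i + 1) (out ++ [[c]])
    else out

def remove_logical_grouping_parentheses_py_alt (condition : String) : String :=
  String.ofList (PySem.Chars.join []
    (pvLoopB condition.toList (pvBuildMatch condition.toList 0 [] PySem.Dict.empty)
      condition.toList.length 0 []))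

-- ===== PRECONDITION & SPEC =====
def Spec_remove_logical_grouping_parentheses_py (condition : String) (out : String) : Prop := out = remove_logical_grouping_parentheses_py_alt condition
instance (condition : String) (out : String) : Decidable (Spec_remove_logical_grouping_parentheses_py condition out) := by unfold Spec_remove_logical_grouping_parentheses_py; infer_instance

-- ===== CLAIM (what is proved, stated in full; the proofs are below) =====
def Claim_equal_remove_logical_grouping_parentheses_py : Prop := ∀ (condition : String), Dom_remove_logical_grouping_parentheses_py condition → Spec_remove_logical_grouping_parentheses_py condition (remove_logical_grouping_parentheses_py condition)

-- ===== LEMMAS AND PROOFS =====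

theorem pvSkipWord_le (cs : List Char) (j : Nat) : pvSkipWord cs j ≤ j := by
  induction j with
  | zero => simp [pvSkipWord]
  | succ k ih => rw [pvSkipWord]; split <;> omega

-- the two word tests agree: an empty word is never a function name
theorem pvKeepFn_eq (cs : List Char) (i : Nat) : pvKeepFnA cs i = pvKeepFnB cs i := by
  unfold pvKeepFnA pvKeepFnB
  rcases Nat.eq_zero_or_pos i with h0 | hpos
  · subst h0; simp [pvSkipSpace, pvSkipWord, pvFuncWord]
  · simp only [hpos, if_pos]
    have hle := pvSkipWord_le cs (pvSkipSpace cs i)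
    rcases Nat.lt_or_ge (pvSkipWord cs (pvSkipSpace cs i)) (pvSkipSpace cs i) with hlt | hge
    · simp [hlt]
    · have heq : pvSkipWord cs (pvSkipSpace cs i) = pvSkipSpace cs i := by omega
      simp [heq, pvFuncWord]

-- proof-only rephrasing of A's inner scan, structural in the remaining characters:
-- (number of characters consumed, final count)
def pvScan (xs : List Char) (count : Int) : Nat × Int :=
  match xs with
  | [] => (0, count)
  | x :: rest =>
    if 0 < count then
      let count' := if x = '(' then count + 1 else if x = ')' then count - 1 else count
      let p := pvScan rest count'
      (p.1 + 1, p.2)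
    else (0, count)

theorem pvScan_zero (xs : List Char) : pvScan xs 0 = (0, 0) := by
  cases xs <;> simp [pvScan]

theorem pvBuildMatch_cons_open (rest : List Char) (idx : Nat) (stack : List Nat)
    (d : PySem.Dict Nat Nat) :
    pvBuildMatch ('(' :: rest) idx stack d = pvBuildMatch rest (idx + 1) (idx :: stack) d := by
  rw [pvBuildMatch.eq_def]; simp

theorem pvBuildMatch_cons_close_nil (rest : List Char) (idx : Nat) (d : PySem.Dict Nat Nat) :
    pvBuildMatch (')' :: rest) idx [] d = pvBuildMatch rest (idx + 1) [] d := by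
  rw [pvBuildMatch.eq_def]; simp

theorem pvBuildMatch_cons_close_cons (rest : List Char) (idx : Nat) (a : Nat) (st : List Nat)
    (d : PySem.Dict Nat Nat) :
    pvBuildMatch (')' :: rest) idx (a :: st) d = pvBuildMatch rest (idx + 1) st (d.insert a idx) := by
  rw [pvBuildMatch.eq_def]; simp

theorem pvBuildMatch_cons_other (x : Char) (rest : List Char) (idx : Nat) (stack : List Nat)
    (d : PySem.Dict Nat Nat) (h1 : x ≠ '(') (h2 : x ≠ ')') :
    pvBuildMatch (x :: rest) idx stack d = pvBuildMatch rest (idx + 1) stack d := by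
  rw [pvBuildMatch.eq_def]; simp [h1, h2]

theorem pvFindCloseA_ge (cs : List Char) :
    ∀ (fuel j : Nat) (count : Int), j ≤ (pvFindCloseA cs fuel j count).1 := by
  intro fuel
  induction fuel with
  | zero => intro j count; simp [pvFindCloseA]
  | succ fuel ih =>
    intro j count
    rw [pvFindCloseA]
    split
    · exact le_trans (by omega) (ih (j + 1) _)
    · simp

theorem pvFindCloseA_eq_scan (cs : List Char) :
    ∀ (xs : List Char) (j : Nat) (count : Int) (fuel : Nat),
      xs = cs.drop j → j + xs.length = cs.length → xs.length ≤ fuel →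
      pvFindCloseA cs fuel j count = (j + (pvScan xs count).1, (pvScan xs count).2) := by
  intro xs
  induction xs with
  | nil =>
    intro j count fuel hx hl hf
    simp only [List.length_nil] at hl
    cases fuel with
    | zero => simp [pvFindCloseA, pvScan]
    | succ fuel =>
      rw [pvFindCloseA]
      have hcond : ¬ (j < cs.length ∧ 0 < count) := by omega
      simp [pvScan, hcond]
  | cons x rest ih =>
    intro j count fuel hx hl hf
    have hj : j < cs.length := by simp at hl; omega
    have hget : cs.getD j ' ' = x := by
      have h1 : cs[j]? = some x := by
        rw [← List.head?_drop, ← hx]; rfl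
      simp [List.getD_eq_getElem?_getD, h1]
    cases fuel with
    | zero => simp at hf
    | succ fuel =>
      rw [pvFindCloseA]
      by_cases hc : 0 < count
      · simp only [hj, hc, and_self, if_true]
        rw [pvScan]
        simp only [hc, if_pos, hget]
        have hrest : rest = cs.drop (j + 1) := by
          have := congrArg List.tail hx
          simpa [List.tail_drop] using this
        have hlen : (j + 1) + rest.length = cs.length := by simp at hl ⊢; omega
        rw [ih (j + 1) _ fuel hrest hlen (by simp at hf; omega)]
        simp only [Prod.mk.injEq]
        exact ⟨by omega, trivial⟩
      · simp only [hc, and_false, if_false]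
        rw [pvScan]
        simp [hc]

theorem pvScan_cons_open (rest : List Char) (c : Int) (hc : 0 < c) :
    pvScan ('(' :: rest) c = ((pvScan rest (c + 1)).1 + 1, (pvScan rest (c + 1)).2) := by
  simp [pvScan, hc]

theorem pvScan_cons_close (rest : List Char) (c : Int) (hc : 0 < c) :
    pvScan (')' :: rest) c = ((pvScan rest (c - 1)).1 + 1, (pvScan rest (c - 1)).2) := by
  simp [pvScan, hc]

theorem pvScan_cons_other (x : Char) (rest : List Char) (c : Int) (hc : 0 < c)
    (h1 : x ≠ '(') (h2 : x ≠ ')') :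
    pvScan (x :: rest) c = ((pvScan rest c).1 + 1, (pvScan rest c).2) := by
  simp [pvScan, hc, h1, h2]

theorem pvBuildMatch_get?_stable :
    ∀ (xs : List Char) (q : Nat) (st : List Nat) (d : PySem.Dict Nat Nat) (o : Nat),
      o ∉ st → o < q → (pvBuildMatch xs q st d).get? o = d.get? o := by
  intro xs
  induction xs with
  | nil => intro q st d o _ _; rfl
  | cons x rest ih =>
    intro q st d o hst ho
    by_cases h1 : x = '('
    · subst h1
      rw [pvBuildMatch_cons_open]
      refine ih (q + 1) (q :: st) d o ?_ (by omega)
      simp only [List.mem_cons]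
      push_neg
      exact ⟨by omega, hst⟩
    · by_cases h2 : x = ')'
      · subst h2
        cases st with
        | nil =>
          rw [pvBuildMatch_cons_close_nil]
          exact ih (q + 1) [] d o (by simp) (by omega)
        | cons a st' =>
          rw [pvBuildMatch_cons_close_cons]
          have ha : o ≠ a := fun h => hst (h ▸ List.mem_cons_self)
          rw [ih (q + 1) st' (d.insert a q) o (fun h => hst (List.mem_cons_of_mem _ h)) (by omega)]
          exact PySem.Dict.get?_insert_of_ne d q ha
      · rw [pvBuildMatch_cons_other x rest q st d h1 h2]
        exact ih (q + 1) st d o hst (by omega)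

theorem pvBuildMatch_get?_top :
    ∀ (xs : List Char) (p : Nat) (st₁ st₂ : List Nat) (o : Nat) (d : PySem.Dict Nat Nat),
      (∀ a ∈ st₁ ++ o :: st₂, a < p) → o ∉ st₁ → o ∉ st₂ → d.get? o = none →
      (pvBuildMatch xs p (st₁ ++ o :: st₂) d).get? o =
        (if (pvScan xs ((st₁.length : Int) + 1)).2 = 0
         then some (p + (pvScan xs ((st₁.length : Int) + 1)).1 - 1) else none) := by
  intro xs
  induction xs with
  | nil =>
    intro p st₁ st₂ o d _ _ _ hd
    have h0 : ((st₁.length : Int) + 1) ≠ 0 := by positivity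
    simp [pvBuildMatch, pvScan, h0, hd]
  | cons x rest ih =>
    intro p st₁ st₂ o d hlt h1 h2 hd
    have ho : o < p := hlt o (by simp)
    have hpos : (0 : Int) < (st₁.length : Int) + 1 := by positivity
    by_cases hc1 : x = '('
    · subst hc1
      rw [pvScan_cons_open rest _ hpos, pvBuildMatch_cons_open]
      have hmem : ∀ a ∈ (p :: st₁) ++ o :: st₂, a < p + 1 := by
        intro a ha
        simp only [List.cons_append, List.mem_cons] at ha
        rcases ha with rfl | ha'
        · omega
        · exact Nat.lt_succ_of_lt (hlt a ha')
      have hno : o ∉ (p :: st₁) := by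
        simp only [List.mem_cons]
        push_neg
        exact ⟨by omega, h1⟩
      have hIH := ih (p + 1) (p :: st₁) st₂ o d hmem hno h2 hd
      simp only [List.cons_append, List.length_cons] at hIH
      have hk : ((st₁.length : Int) + 1) + 1 = ((st₁.length + 1 : Nat) : Int) + 1 := by
        push_cast; ring
      rw [hk, hIH]
      split_ifs with hz
      · congr 1; omega
      · rfl
    · by_cases hc2 : x = ')'
      · subst hc2
        rw [pvScan_cons_close rest _ hpos]
        cases st₁ with
        | nil =>
          simp only [List.nil_append, List.length_nil, Nat.cast_zero, zero_add] at *
          rw [pvBuildMatch_cons_close_cons]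
          rw [pvBuildMatch_get?_stable rest (p + 1) st₂ (d.insert o p) o h2 (by omega)]
          rw [PySem.Dict.get?_insert_self]
          norm_num [pvScan_zero]
        | cons a st₁' =>
          simp only [List.cons_append] at *
          rw [pvBuildMatch_cons_close_cons]
          have ha : o ≠ a := fun h => h1 (h ▸ List.mem_cons_self)
          have hIH := ih (p + 1) st₁' st₂ o (d.insert a p)
            (by intro b hb
                have := hlt b (by simp only [List.mem_cons] at hb ⊢; tauto)
                omega)
            (fun h => h1 (List.mem_cons_of_mem _ h)) h2
            (by rw [PySem.Dict.get?_insert_of_ne d p ha]; exact hd)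
          have hk : (((a :: st₁').length : Nat) : Int) + 1 - 1 = (st₁'.length : Int) + 1 := by
            push_cast [List.length_cons]; ring
          rw [hk, hIH]
          split_ifs with hz
          · congr 1; omega
          · rfl
      · rw [pvScan_cons_other x rest _ hpos hc1 hc2, pvBuildMatch_cons_other x rest p _ d hc1 hc2]
        rw [ih (p + 1) st₁ st₂ o d (fun a ha => Nat.lt_succ_of_lt (hlt a ha)) h1 h2 hd]
        split_ifs with hz
        · congr 1; omega
        · rfl

theorem pvBuildMatch_prefix (cs : List Char) :
    ∀ n, n ≤ cs.length →
      ∃ st d, pvBuildMatch cs 0 [] PySem.Dict.empty = pvBuildMatch (cs.drop n) n st d ∧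
        (∀ a ∈ st, a < n) ∧ (∀ a : Nat, a ∈ st ∨ n ≤ a → d.get? a = none) ∧ st.Nodup := by
  intro n
  induction n with
  | zero =>
    intro _
    exact ⟨[], PySem.Dict.empty, by simp, by simp, fun a _ => PySem.Dict.get?_empty a, by simp⟩
  | succ n ih =>
    intro hn
    obtain ⟨st, d, heq, hbound, hnone, hnd⟩ := ih (by omega)
    have hlt : n < cs.length := by omega
    rw [List.drop_eq_getElem_cons hlt] at heq
    by_cases hc1 : cs[n] = '('
    · rw [hc1, pvBuildMatch_cons_open] at heq
      refine ⟨n :: st, d, heq, ?_, ?_, ?_⟩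
      · intro a ha
        rcases List.mem_cons.mp ha with rfl | h
        · omega
        · exact Nat.lt_succ_of_lt (hbound a h)
      · intro a ha
        apply hnone
        rcases ha with ha | ha
        · rcases List.mem_cons.mp ha with rfl | h
          · right; rfl
          · left; exact h
        · right; omega
      · exact List.nodup_cons.mpr ⟨fun h => absurd (hbound n h) (by omega), hnd⟩
    · by_cases hc2 : cs[n] = ')'
      · cases st with
        | nil =>
          rw [hc2, pvBuildMatch_cons_close_nil] at heq
          refine ⟨[], d, heq, by simp, ?_, by simp⟩
          intro a ha
          apply hnone
          rcases ha with ha | ha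
          · simp at ha
          · right; omega
        | cons a st' =>
          rw [hc2, pvBuildMatch_cons_close_cons] at heq
          refine ⟨st', d.insert a n, heq, ?_, ?_, ?_⟩
          · intro b hb
            exact Nat.lt_succ_of_lt (hbound b (List.mem_cons_of_mem _ hb))
          · intro b hb
            have hba : b ≠ a := by
              rcases hb with hb | hb
              · intro h; subst h; exact (List.nodup_cons.mp hnd).1 hb
              · have := hbound a List.mem_cons_self; omega
            rw [PySem.Dict.get?_insert_of_ne d n hba]
            apply hnone
            rcases hb with hb | hb
            · left; exact List.mem_cons_of_mem _ hb
            · right; omega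
          · exact (List.nodup_cons.mp hnd).2
      · rw [pvBuildMatch_cons_other _ _ _ _ _ hc1 hc2] at heq
        refine ⟨st, d, heq, ?_, ?_, hnd⟩
        · intro a ha
          exact Nat.lt_succ_of_lt (hbound a ha)
        · intro a ha
          apply hnone
          rcases ha with ha | ha
          · left; exact ha
          · right; omega

-- the precomputed table read at an opener equals the outcome of A's forward scan from there
theorem pvTable_get? (cs : List Char) (n : Nat) (hn : n < cs.length) (hc : cs[n] = '(') :
    (pvBuildMatch cs 0 [] PySem.Dict.empty).get? n =
      (if (pvFindCloseA cs cs.length (n + 1) 1).2 = 0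
       then some ((pvFindCloseA cs cs.length (n + 1) 1).1 - 1) else none) := by
  obtain ⟨st, d, heq, hbound, hnone, hnd⟩ := pvBuildMatch_prefix cs n (by omega)
  rw [heq, List.drop_eq_getElem_cons hn, hc, pvBuildMatch_cons_open]
  have htop := pvBuildMatch_get?_top (cs.drop (n + 1)) (n + 1) [] st n d
    (by intro a ha
        simp only [List.nil_append, List.mem_cons] at ha
        rcases ha with rfl | h
        · omega
        · exact Nat.lt_succ_of_lt (hbound a h))
    (by simp) (fun h => absurd (hbound n h) (by omega)) (hnone n (Or.inr le_rfl))
  simp only [List.nil_append, List.length_nil, Nat.cast_zero, zero_add] at htop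
  have hscan := pvFindCloseA_eq_scan cs (cs.drop (n + 1)) (n + 1) 1 cs.length rfl (by simp; omega) (by simp)
  rw [htop, hscan]

theorem pvFlatten_append (out : List (List Char)) (x : List Char) :
    (out ++ [x]).flatten = out.flatten ++ x := by simp

theorem pvLoop_eq (cs : List Char) :
    ∀ (fuel i : Nat) (out : List (List Char)), cs.length - i ≤ fuel →
      pvLoopA cs fuel i out.flatten =
        (pvLoopB cs (pvBuildMatch cs 0 [] PySem.Dict.empty) fuel i out).flatten := by
  intro fuel
  induction fuel with
  | zero =>
    intro i out _
    rw [pvLoopA, pvLoopB]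
  | succ fuel ih =>
    intro i out hf
    rw [pvLoopA, pvLoopB]
    by_cases hi : i < cs.length
    · simp only [hi, if_true]
      have hgd : cs.getD i ' ' = cs[i] := List.getD_eq_getElem cs ' ' hi
      by_cases hc : cs.getD i ' ' = '('
      · simp only [hc, if_pos]
        rw [pvKeepFn_eq]
        by_cases hk : pvKeepFnB cs i
        · simp only [hk, if_pos]
          rw [← pvFlatten_append]
          exact ih (i + 1) _ (by omega)
        · simp only [hk, Bool.false_eq_true, if_false]
          rw [pvTable_get? cs i hi (by rw [← hgd]; exact hc)]
          by_cases hq : (pvFindCloseA cs cs.length (i + 1) 1).2 = 0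
          · simp only [hq, if_pos]
            have hge := pvFindCloseA_ge cs cs.length (i + 1) 1
            by_cases hl : pvIsLogical ((cs.drop (i + 1)).take
                ((pvFindCloseA cs cs.length (i + 1) 1).1 - 1 - (i + 1)))
            · simp only [hl, if_pos]
              have hj : (pvFindCloseA cs cs.length (i + 1) 1).1 - 1 + 1
                  = (pvFindCloseA cs cs.length (i + 1) 1).1 := by omega
              rw [hj, ← pvFlatten_append]
              exact ih _ _ (by omega)
            · simp only [hl, Bool.false_eq_true, if_false]
              rw [← pvFlatten_append]
              exact ih (i + 1) _ (by omega)
          · simp only [hq, if_false]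
            rw [← pvFlatten_append]
            exact ih (i + 1) _ (by omega)
      · simp only [hc, if_false]
        rw [← pvFlatten_append]
        exact ih (i + 1) _ (by omega)
    · simp [hi]

theorem pvJoin_nil_eq_flatten (ps : List (List Char)) :
    PySem.Chars.join [] ps = ps.flatten := by
  simp only [PySem.Chars.join, List.intercalate]
  induction ps with
  | nil => rfl
  | cons a ps ih =>
    cases ps with
    | nil => rfl
    | cons b ps' =>
      rw [show List.intersperse ([] : List Char) (a :: b :: ps')
            = a :: [] :: List.intersperse [] (b :: ps') from rfl]
      simp only [List.flatten_cons, List.nil_append] at ih ⊢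
      rw [ih]

-- ===== VERDICT (by name: the statement is the Claim_ definition above) =====
theorem remove_logical_grouping_parentheses_py_spec : Claim_equal_remove_logical_grouping_parentheses_py := by
  intro condition _
  unfold Spec_remove_logical_grouping_parentheses_py
  unfold remove_logical_grouping_parentheses_py remove_logical_grouping_parentheses_py_alt
  apply congrArg
  rw [pvJoin_nil_eq_flatten]
  have := pvLoop_eq condition.toList condition.toList.length 0 [] (by omega)
  simpa using this
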